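-- pv_equiv track=rewrite | github.com/edwardtavila-boop/eta-engine | venues/alpaca.py | _alpaca_crypto_base
-- ===== SOURCE A (Python) =====
-- _ALPACA_CRYPTO_BASES: frozenset[str] = frozenset(
--     {
--         "AAVE",
--         "AVAX",
--         "BAT",
--         "BCH",
--         "BTC",
--         "CRV",
--         "DOGE",
--         "DOT",
--         "ETH",
--         "GRT",
--         "LINK",
--         "LTC",
--         "MKR",
--         "PEPE",
--         "SHIB",
--         "SOL",
--         "SUSHI",
--         "UNI",
--         "USDC",
--         "USDT",
--         "XRP",
--         "XTZ",
--         "YFI",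
--     }
-- )
--
-- def _alpaca_crypto_base(symbol: str) -> str | None:
--     """Return canonical crypto base ticker, or ``None`` if not crypto.
--
--     Accepts: ``BTC``, ``BTCUSD``, ``BTCUSDT``, ``BTC/USD``, ``BTC-USD``,
--     ``/BTC``, case-insensitive. Returns the upper-case base (``"BTC"``).
--     """
--     raw = (symbol or "").strip().upper().lstrip("/")
--     if not raw:
--         return None
--     head = raw.split("/", 1)[0].split("-", 1)[0].split("_", 1)[0]
--     for suffix in ("USDT", "USDC", "USD"):
--         if head.endswith(suffix) and len(head) > len(suffix):
--             head = head[: -len(suffix)]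
--             break
--     return head if head in _ALPACA_CRYPTO_BASES else None
-- ===== SOURCE B (Python) =====
-- _ALPACA_CRYPTO_BASES = frozenset(
--     {
--         "AAVE", "AVAX", "BAT", "BCH", "BTC", "CRV", "DOGE", "DOT", "ETH",
--         "GRT", "LINK", "LTC", "MKR", "PEPE", "SHIB", "SOL", "SUSHI", "UNI",
--         "USDC", "USDT", "XRP", "XTZ", "YFI",
--     }
-- )
--
--
-- def _alpaca_crypto_base(symbol: str) -> str | None:
--     """Single left-to-right character scan instead of chained splits:
--     skip leading slashes of the stripped text, collect upper-cased chars
--     until the first separator, then strip a quote suffix with one if/elif."""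
--     text = (symbol or "").strip()
--     i = 0
--     while i < len(text) and text[i] == "/":
--         i += 1
--     buf = []
--     while i < len(text) and text[i] not in "/-_":
--         buf.append(text[i].upper())
--         i += 1
--     head = "".join(buf)
--     if len(head) > 4 and head[-4:] in ("USDT", "USDC"):
--         head = head[:-4]
--     elif len(head) > 3 and head[-3:] == "USD":
--         head = head[:-3]
--     return head if head in _ALPACA_CRYPTO_BASES else None
-- ===== Notes on version B (the rewrite author's own statement) =====
-- stated objective: alternative
-- what changed: Replaces A's whole-string upper/lstrip plus three chained split calls and the suffix for-loop with a single left-to-right character scan (skip leading slashes, collect upper-cased chars until the first of /-_) and one if/elif slice comparison for the USDT/USDC/USD suffix.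
import Mathlib
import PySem

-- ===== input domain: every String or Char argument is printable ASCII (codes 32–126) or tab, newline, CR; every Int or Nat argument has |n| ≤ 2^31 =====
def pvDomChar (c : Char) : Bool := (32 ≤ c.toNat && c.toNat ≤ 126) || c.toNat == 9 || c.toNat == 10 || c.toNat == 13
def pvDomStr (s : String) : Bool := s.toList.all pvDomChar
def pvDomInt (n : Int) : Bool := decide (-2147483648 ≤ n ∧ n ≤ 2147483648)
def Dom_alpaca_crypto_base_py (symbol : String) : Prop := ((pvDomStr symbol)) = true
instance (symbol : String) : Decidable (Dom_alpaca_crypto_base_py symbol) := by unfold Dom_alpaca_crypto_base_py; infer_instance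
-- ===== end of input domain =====

-- B replaces A's chained splits and suffix loop by one character scan plus an if/elif suffix slice; equal return value on all inputs (alternative decomposition, no speed claim).

-- ===== PORT A =====
-- the module constant _ALPACA_CRYPTO_BASES (shared by both Pythons)
def pvBases : List String :=
  ["AAVE", "AVAX", "BAT", "BCH", "BTC", "CRV", "DOGE", "DOT", "ETH", "GRT",
   "LINK", "LTC", "MKR", "PEPE", "SHIB", "SOL", "SUSHI", "UNI", "USDC",
   "USDT", "XRP", "XTZ", "YFI"]

-- s.split(sep, 1)[0]  (the split list is always non-empty, so [0] is its head)
def pySplit1Head (cs : List Char) (sep : Char) : List Char :=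
  (PySem.Chars.splitOnMax cs [sep] 1).headD []

-- the 'for suffix in ("USDT", "USDC", "USD")' loop with its break
def pySuffixLoop : List (List Char) → List Char → List Char
  | [], head => head
  | suf :: rest, head =>
      if PySem.Chars.endswith head suf && decide (suf.length < head.length) then
        PySem.List.slice head none (some (-(suf.length : Int)))   -- head[: -len(suffix)]
      else pySuffixLoop rest head

def alpaca_crypto_base_py (symbol : String) : Option String :=
  -- (symbol or "").strip().upper().lstrip('/'); lstrip('/') ported by hand as
  -- dropWhile (· == '/') — exact: it removes exactly the leading '/' characters
  let raw := (PySem.Chars.upper (PySem.Chars.strip symbol.toList)).dropWhile (fun c => c == '/')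
  if raw = [] then none
  else
    let head0 := pySplit1Head (pySplit1Head (pySplit1Head raw '/') '-') '_'
    let head := pySuffixLoop ["USDT".toList, "USDC".toList, "USD".toList] head0
    let hs := String.ofList head
    if pvBases.contains hs then some hs else none

-- ===== PORT B =====
-- the first while loop: skip leading '/'
def altSkipSlashes : List Char → List Char
  | [] => []
  | c :: rest => if c = '/' then altSkipSlashes rest else c :: rest

def altIsSep (c : Char) : Bool := c == '/' || c == '-' || c == '_'

-- the second while loop: collect upper-cased chars until a separator
def altHead : List Char → List Char
  | [] => []
  | c :: rest => if altIsSep c then [] else PySem.Chars.upperChar c :: altHead rest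

-- the if/elif suffix strip
def altStripSuffix (h : List Char) : List Char :=
  if 4 < h.length ∧ (PySem.List.slice h (some (-4)) none = "USDT".toList ∨
                     PySem.List.slice h (some (-4)) none = "USDC".toList) then
    PySem.List.slice h none (some (-4))
  else if 3 < h.length ∧ PySem.List.slice h (some (-3)) none = "USD".toList then
    PySem.List.slice h none (some (-3))
  else h

def alpaca_crypto_base_py_alt (symbol : String) : Option String :=
  let head := altStripSuffix (altHead (altSkipSlashes (PySem.Chars.strip symbol.toList)))
  let hs := String.ofList head
  if pvBases.contains hs then some hs else none

-- ===== PRECONDITION & SPEC =====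
def Spec_alpaca_crypto_base_py (symbol : String) (out : Option String) : Prop := out = alpaca_crypto_base_py_alt symbol
instance (symbol : String) (out : Option String) : Decidable (Spec_alpaca_crypto_base_py symbol out) := by unfold Spec_alpaca_crypto_base_py; infer_instance

-- ===== CLAIM (what is proved, stated in full; the proofs are below) =====
def Claim_equal_alpaca_crypto_base_py : Prop := ∀ (symbol : String), Dom_alpaca_crypto_base_py symbol → Spec_alpaca_crypto_base_py symbol (alpaca_crypto_base_py symbol)

-- ===== LEMMAS AND PROOFS =====

lemma char_bne_of_toNat {a b : Char} (h : a.toNat ≠ b.toNat) : (a == b) = false := by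
  simp only [beq_eq_false_iff_ne]
  intro he; exact h (congrArg Char.toNat he)

lemma upperChar_toNat_lower (c : Char) (h1 : 97 ≤ c.toNat) (h2 : c.toNat ≤ 122) :
    (PySem.Chars.upperChar c).toNat = c.toNat - 32 := by
  unfold PySem.Chars.upperChar PySem.Chars.islower
  rw [if_pos (by simp only [Bool.and_eq_true, decide_eq_true_eq]; exact ⟨h1, h2⟩)]
  rw [Char.toNat_ofNat, if_pos (by left; omega)]

lemma upperChar_not_lower (c : Char) (h : ¬ PySem.Chars.islower c = true) :
    PySem.Chars.upperChar c = c := by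
  unfold PySem.Chars.upperChar; rw [if_neg h]

lemma islower_toNat (c : Char) (h : PySem.Chars.islower c = true) :
    97 ≤ c.toNat ∧ c.toNat ≤ 122 := by
  unfold PySem.Chars.islower at h
  simp only [Bool.and_eq_true, decide_eq_true_eq] at h
  exact ⟨h.1, h.2⟩

lemma altIsSep_upperChar (c : Char) : altIsSep (PySem.Chars.upperChar c) = altIsSep c := by
  by_cases h : PySem.Chars.islower c = true
  · obtain ⟨h1, h2⟩ := islower_toNat c h
    have hn := upperChar_toNat_lower c h1 h2
    unfold altIsSep
    rw [char_bne_of_toNat (a := PySem.Chars.upperChar c) (b := '/') (by rw [hn]; show _ ≠ 47; omega)]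
    rw [char_bne_of_toNat (a := PySem.Chars.upperChar c) (b := '-') (by rw [hn]; show _ ≠ 45; omega)]
    rw [char_bne_of_toNat (a := PySem.Chars.upperChar c) (b := '_') (by rw [hn]; show _ ≠ 95; omega)]
    rw [char_bne_of_toNat (a := c) (b := '/') (by show _ ≠ 47; omega)]
    rw [char_bne_of_toNat (a := c) (b := '-') (by show _ ≠ 45; omega)]
    rw [char_bne_of_toNat (a := c) (b := '_') (by show _ ≠ 95; omega)]
  · rw [upperChar_not_lower c h]

lemma slash_upperChar (c : Char) : (PySem.Chars.upperChar c == '/') = (c == '/') := by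
  by_cases h : PySem.Chars.islower c = true
  · obtain ⟨h1, h2⟩ := islower_toNat c h
    have hn := upperChar_toNat_lower c h1 h2
    rw [char_bne_of_toNat (a := PySem.Chars.upperChar c) (b := '/') (by rw [hn]; show _ ≠ 47; omega)]
    rw [char_bne_of_toNat (a := c) (b := '/') (by show _ ≠ 47; omega)]
  · rw [upperChar_not_lower c h]

-- go with m = 0 returns immediately
lemma go_mzero (sep : List Char) (fuel : ℕ) (l cur : List Char) (acc : List (List Char)) :
    PySem.Chars.splitOnMax.go sep fuel 0 l cur acc = ((cur.reverse ++ l) :: acc).reverse := by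
  cases fuel with
  | zero => rfl
  | succ f => cases l with
    | nil => simp [PySem.Chars.splitOnMax.go]
    | cons c rest => simp [PySem.Chars.splitOnMax.go]

-- head of go with maxsplit 1 and empty acc is the prefix before the first sep
lemma go_head (c : Char) (fuel : ℕ) (l cur : List Char) (hfuel : l.length < fuel) :
    (PySem.Chars.splitOnMax.go [c] fuel 1 l cur []).headD [] =
      cur.reverse ++ l.takeWhile (fun x => x != c) := by
  induction fuel generalizing l cur with
  | zero => omega
  | succ f ih =>
    cases l with
    | nil => simp [PySem.Chars.splitOnMax.go]
    | cons c0 rest =>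
      by_cases h : c0 = c
      · subst h
        have hpre : List.isPrefixOf [c0] (c0 :: rest) = true := by
          simp [List.isPrefixOf]
        simp only [PySem.Chars.splitOnMax.go, hpre, if_true]
        rw [go_mzero]
        simp [List.takeWhile]
      · have hpre : List.isPrefixOf [c] (c0 :: rest) = false := by
          simp [List.isPrefixOf]; exact fun hh => absurd hh.symm h
        simp only [PySem.Chars.splitOnMax.go, hpre]
        simp only [List.length_cons] at hfuel
        rw [if_neg (by simp), if_neg (by simp)]
        rw [ih rest (c0 :: cur) (by omega)]
        have hb : (c0 != c) = true := by simp [h]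
        simp [List.takeWhile, hb]

lemma split1Head_eq (cs : List Char) (sep : Char) :
    pySplit1Head cs sep = cs.takeWhile (fun x => x != sep) := by
  unfold pySplit1Head PySem.Chars.splitOnMax
  rw [if_neg (by norm_num)]
  have := go_head sep (cs.length + 1) cs [] (by omega)
  simpa using this

lemma altSkipSlashes_eq (cs : List Char) :
    altSkipSlashes cs = cs.dropWhile (fun c => c == '/') := by
  induction cs with
  | nil => rfl
  | cons c rest ih =>
    by_cases h : c = '/'
    · have hb : (c == '/') = true := by simp [h]
      simp [altSkipSlashes, h, List.dropWhile, ih]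
    · have hb : (c == '/') = false := by simp [h]
      simp [altSkipSlashes, h, List.dropWhile, hb]

lemma altHead_eq (cs : List Char) :
    altHead cs = (cs.takeWhile (fun c => !altIsSep c)).map PySem.Chars.upperChar := by
  induction cs with
  | nil => rfl
  | cons c rest ih =>
    by_cases h : altIsSep c = true
    · simp [altHead, h, List.takeWhile]
    · simp only [Bool.not_eq_true] at h
      simp [altHead, h, List.takeWhile, ih]

-- the three chained split-heads are one takeWhile over the separator set
lemma chain_eq (raw : List Char) :
    pySplit1Head (pySplit1Head (pySplit1Head raw '/') '-') '_' =
      raw.takeWhile (fun c => !altIsSep c) := by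
  simp only [split1Head_eq, List.takeWhile_takeWhile]
  congr 1
  funext c
  unfold altIsSep
  cases h1 : (c == '/') <;> cases h2 : (c == '-') <;> cases h3 : (c == '_') <;>
    simp [bne, h1, h2, h3]

lemma endswith_iff_drop (h p : List Char) :
    PySem.Chars.endswith h p = true ↔ h.drop (h.length - p.length) = p := by
  unfold PySem.Chars.endswith
  rw [List.isSuffixOf_iff_suffix, List.suffix_iff_eq_drop]
  exact ⟨fun e => e.symm, fun e => e.symm⟩

-- the suffix loop equals the if/elif slice test
lemma suffix_eq (h : List Char) :
    pySuffixLoop ["USDT".toList, "USDC".toList, "USD".toList] h = altStripSuffix h := by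
  have e4 : PySem.List.slice h (some (-4)) none = h.drop (h.length - 4) :=
    PySem.List.slice_from_neg_ofNat h 4 (by omega)
  have e3 : PySem.List.slice h (some (-3)) none = h.drop (h.length - 3) :=
    PySem.List.slice_from_neg_ofNat h 3 (by omega)
  have t4 : PySem.List.slice h none (some (-4)) = h.take (h.length - 4) :=
    PySem.List.slice_to_neg_ofNat h 4 (by omega)
  have t3 : PySem.List.slice h none (some (-3)) = h.take (h.length - 3) :=
    PySem.List.slice_to_neg_ofNat h 3 (by omega)
  have w4 : PySem.Chars.endswith h "USDT".toList = true ↔ h.drop (h.length - 4) = "USDT".toList :=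
    endswith_iff_drop h "USDT".toList
  have w4c : PySem.Chars.endswith h "USDC".toList = true ↔ h.drop (h.length - 4) = "USDC".toList :=
    endswith_iff_drop h "USDC".toList
  have w3 : PySem.Chars.endswith h "USD".toList = true ↔ h.drop (h.length - 3) = "USD".toList :=
    endswith_iff_drop h "USD".toList
  have hL4 : "USDT".length = 4 := rfl
  have hLC : "USDC".length = 4 := rfl
  have hL3 : "USD".length = 3 := rfl
  simp only [pySuffixLoop, altStripSuffix, e4, e3, t4, t3]
  split_ifs with g1 g2 g3 g4 g5 g6 g7 g8 g9
  all_goals try simp only [hL4, hLC, hL3, Nat.cast_ofNat, Bool.and_eq_true,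
    decide_eq_true_eq, String.length_toList, w4, w4c, w3] at *
  all_goals first
    | exact t4
    | exact t3
    | rfl
    | tauto

-- both pipelines compute the same head (before the membership test)
lemma heads_eq (cs : List Char) :
    pySplit1Head (pySplit1Head (pySplit1Head
        ((PySem.Chars.upper cs).dropWhile (fun c => c == '/')) '/') '-') '_' =
      altHead (altSkipSlashes cs) := by
  rw [chain_eq, altHead_eq, altSkipSlashes_eq]
  unfold PySem.Chars.upper
  rw [List.dropWhile_map, List.takeWhile_map]
  have p1 : ((fun c => c == '/') ∘ PySem.Chars.upperChar) = (fun c : Char => c == '/') := by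
    funext c; simp only [Function.comp_apply, slash_upperChar]
  have p2 : ((fun c => !altIsSep c) ∘ PySem.Chars.upperChar) = (fun c : Char => !altIsSep c) := by
    funext c; simp only [Function.comp_apply, altIsSep_upperChar]
  rw [p1, p2]

-- ===== VERDICT (by name: the statement is the Claim_ definition above) =====
theorem alpaca_crypto_base_py_spec : Claim_equal_alpaca_crypto_base_py := by
  intro symbol _
  unfold Spec_alpaca_crypto_base_py alpaca_crypto_base_py alpaca_crypto_base_py_alt
  by_cases hraw :
      (PySem.Chars.upper (PySem.Chars.strip symbol.toList)).dropWhile (fun c => c == '/') = []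
  · rw [if_pos hraw]
    have hskip : altSkipSlashes (PySem.Chars.strip symbol.toList) = [] := by
      rw [altSkipSlashes_eq]
      unfold PySem.Chars.upper at hraw
      rw [List.dropWhile_map] at hraw
      have p1 : ((fun c => c == '/') ∘ PySem.Chars.upperChar) = (fun c : Char => c == '/') := by
        funext c; simp only [Function.comp_apply, slash_upperChar]
      rw [p1] at hraw
      exact List.map_eq_nil_iff.mp hraw
    rw [hskip]
    have h0 : altStripSuffix (altHead []) = [] := by decide
    rw [h0]
    decide
  · rw [if_neg hraw]
    simp only [suffix_eq, heads_eq]
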